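-- pv_equiv track=rewrite | github.com/HuntedCode/plat-pursuit-django | trophies/migrations/0186_dashboardconfig_pursuit_activity.py | _rewrite_module_order
-- ===== SOURCE A (Python) =====
-- LEGACY_SLUGS = ('recent_activity', 'recent_platinums')
--
-- NEW_SLUG = 'pursuit_activity'
--
-- def _rewrite_module_order(module_order):
--     """Replace legacy slugs with one pursuit_activity entry, preserving position."""
--     if not isinstance(module_order, list):
--         return module_order
--     new_order = []
--     inserted = False
--     for slug in module_order:
--         if slug in LEGACY_SLUGS:
--             if not inserted:
--                 new_order.append(NEW_SLUG)
--                 inserted = True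
--             # Otherwise: skip the second legacy slug (already replaced)
--         else:
--             new_order.append(slug)
--     # Dedupe in case the user already had pursuit_activity AND a legacy slug
--     seen = set()
--     deduped = []
--     for slug in new_order:
--         if slug not in seen:
--             seen.add(slug)
--             deduped.append(slug)
--     return deduped
-- ===== SOURCE B (Python) =====
-- LEGACY_SLUGS = ('recent_activity', 'recent_platinums')
--
-- NEW_SLUG = 'pursuit_activity'
--
-- def _rewrite_module_order(module_order):
--     """Replace legacy slugs with one pursuit_activity entry, preserving position."""
--     if not isinstance(module_order, list):
--         return module_order
--     seen = set()
--     result = []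
--     for slug in module_order:
--         key = NEW_SLUG if slug in LEGACY_SLUGS else slug
--         if key not in seen:
--             seen.add(key)
--             result.append(key)
--     return result
-- ===== Notes on version B (the rewrite author's own statement) =====
-- stated objective: simpler
-- what changed: Fuses A's replace-pass (with its 'inserted' flag) and separate dedupe-pass into one loop that maps each slug to its replacement key and appends it only on first sight, the seen-set subsuming the flag.
import Mathlib
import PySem

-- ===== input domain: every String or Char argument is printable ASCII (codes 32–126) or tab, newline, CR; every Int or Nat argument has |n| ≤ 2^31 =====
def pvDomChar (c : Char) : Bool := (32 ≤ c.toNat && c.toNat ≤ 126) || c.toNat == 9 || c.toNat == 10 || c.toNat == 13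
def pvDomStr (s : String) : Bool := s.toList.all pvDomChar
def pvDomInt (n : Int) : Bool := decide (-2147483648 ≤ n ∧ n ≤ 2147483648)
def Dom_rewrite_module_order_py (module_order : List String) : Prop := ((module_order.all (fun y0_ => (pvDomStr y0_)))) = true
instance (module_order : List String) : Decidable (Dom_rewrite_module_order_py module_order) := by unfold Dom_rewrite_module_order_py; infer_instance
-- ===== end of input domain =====

-- B fuses A's replace-pass (with its 'inserted' flag) and separate dedupe-pass into one
-- loop with a single seen-set; objective: simpler (same O(n) cost).

-- ===== PORT A =====
-- LEGACY_SLUGS and NEW_SLUG, module-level constants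
def pvLegacySlugs : List String := ["recent_activity", "recent_platinums"]
def pvNewSlug : String := "pursuit_activity"

-- literal port of A: first loop builds new_order with the 'inserted' flag,
-- second loop dedupes with a seen set (the isinstance branch is outside the List String type).
def rewrite_module_order_py (module_order : List String) : List String :=
  let p := module_order.foldl
    (fun (st : List String × Bool) slug =>
      if slug ∈ pvLegacySlugs then
        (if st.2 then st else (st.1 ++ [pvNewSlug], true))
      else (st.1 ++ [slug], st.2))
    ([], false)
  let d := p.1.foldl
    (fun (st : PySem.Set String × List String) slug =>
      if slug ∈ st.1 then st
      else (PySem.Set.add st.1 slug, st.2 ++ [slug]))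
    (PySem.Set.empty, [])
  d.2

-- ===== PORT B =====
def rewrite_module_order_py_alt (module_order : List String) : List String :=
  (module_order.foldl
    (fun (st : PySem.Set String × List String) slug =>
      let key := if slug ∈ pvLegacySlugs then pvNewSlug else slug
      if key ∈ st.1 then st
      else (PySem.Set.add st.1 key, st.2 ++ [key]))
    (PySem.Set.empty, [])).2

-- ===== PRECONDITION & SPEC =====
def Spec_rewrite_module_order_py (module_order : List String) (out : List String) : Prop := out = rewrite_module_order_py_alt module_order
instance (module_order : List String) (out : List String) : Decidable (Spec_rewrite_module_order_py module_order out) := by unfold Spec_rewrite_module_order_py; infer_instance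

-- ===== CLAIM (what is proved, stated in full; the proofs are below) =====
def Claim_equal_rewrite_module_order_py : Prop := ∀ (module_order : List String), Dom_rewrite_module_order_py module_order → Spec_rewrite_module_order_py module_order (rewrite_module_order_py module_order)

-- ===== LEMMAS AND PROOFS =====

-- recursive restatements of the three loops (proof helpers only)
def pvPass1 : List String → Bool → List String
  | [], _ => []
  | s :: xs, ins =>
      if s ∈ pvLegacySlugs then
        (if ins then pvPass1 xs ins else pvNewSlug :: pvPass1 xs true)
      else s :: pvPass1 xs ins

def pvDedup : List String → PySem.Set String → List String
  | [], _ => []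
  | s :: xs, seen =>
      if s ∈ seen then pvDedup xs seen
      else s :: pvDedup xs (PySem.Set.add seen s)

def pvFused : List String → PySem.Set String → List String
  | [], _ => []
  | s :: xs, seen =>
      let key := if s ∈ pvLegacySlugs then pvNewSlug else s
      if key ∈ seen then pvFused xs seen
      else key :: pvFused xs (PySem.Set.add seen key)

theorem pvFoldl1_fst : ∀ (xs acc : List String) (ins : Bool),
    (xs.foldl (fun (st : List String × Bool) slug =>
      if slug ∈ pvLegacySlugs then
        (if st.2 then st else (st.1 ++ [pvNewSlug], true))
      else (st.1 ++ [slug], st.2)) (acc, ins)).1 = acc ++ pvPass1 xs ins := by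
  intro xs
  induction xs with
  | nil => intro acc ins; simp [pvPass1]
  | cons s xs ih =>
      intro acc ins
      simp only [List.foldl_cons, pvPass1]
      by_cases h : s ∈ pvLegacySlugs
      · cases ins <;> simp [h, ih]
      · simp [h, ih]

theorem pvFoldl2_snd : ∀ (xs : List String) (seen : PySem.Set String) (acc : List String),
    (xs.foldl (fun (st : PySem.Set String × List String) slug =>
      if slug ∈ st.1 then st
      else (PySem.Set.add st.1 slug, st.2 ++ [slug])) (seen, acc)).2 = acc ++ pvDedup xs seen := by
  intro xs
  induction xs with
  | nil => intro seen acc; simp [pvDedup]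
  | cons s xs ih =>
      intro seen acc
      simp only [List.foldl_cons, pvDedup]
      by_cases h : s ∈ seen <;> simp [h, ih]

theorem pvFoldlB_snd : ∀ (xs : List String) (seen : PySem.Set String) (acc : List String),
    (xs.foldl (fun (st : PySem.Set String × List String) slug =>
      let key := if slug ∈ pvLegacySlugs then pvNewSlug else slug
      if key ∈ st.1 then st
      else (PySem.Set.add st.1 key, st.2 ++ [key])) (seen, acc)).2 = acc ++ pvFused xs seen := by
  intro xs
  induction xs with
  | nil => intro seen acc; simp [pvFused]
  | cons s xs ih =>
      intro seen acc
      simp only [List.foldl_cons, pvFused]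
      by_cases h : (if s ∈ pvLegacySlugs then pvNewSlug else s) ∈ seen <;> simp [h, ih]

-- the heart: deduping the replace-pass output equals the fused loop, under the invariant
-- that 'inserted' implies the new slug is already in the seen set.
theorem pvMain : ∀ (xs : List String) (ins : Bool) (seen : PySem.Set String),
    (ins = true → pvNewSlug ∈ seen) → pvDedup (pvPass1 xs ins) seen = pvFused xs seen := by
  intro xs
  induction xs with
  | nil => intro ins seen _; simp [pvPass1, pvDedup, pvFused]
  | cons s xs ih =>
      intro ins seen hinv
      by_cases h : s ∈ pvLegacySlugs
      · cases ins with
        | true =>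
            have hn : pvNewSlug ∈ seen := hinv rfl
            simp only [pvPass1, pvFused, h, if_pos]
            simp only [hn, if_pos]
            exact ih true seen hinv
        | false =>
            simp only [pvPass1, pvFused, h, if_pos, Bool.false_eq_true, if_false]
            by_cases hn : pvNewSlug ∈ seen
            · simp only [pvDedup, hn, if_pos]
              exact ih true seen (fun _ => hn)
            · simp only [pvDedup, hn, if_neg, not_false_iff]
              rw [List.cons_inj_right]
              exact ih true (PySem.Set.add seen pvNewSlug)
                (fun _ => (PySem.Set.mem_add _ _ _).2 (Or.inr rfl))
      · simp only [pvPass1, pvFused, h, if_false]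
        by_cases hs : s ∈ seen
        · simp only [pvDedup, hs, if_pos]
          exact ih ins seen hinv
        · simp only [pvDedup, hs, if_neg, not_false_iff]
          rw [List.cons_inj_right]
          exact ih ins (PySem.Set.add seen s)
            (fun hi => (PySem.Set.mem_add _ _ _).2 (Or.inl (hinv hi)))

-- ===== VERDICT (by name: the statement is the Claim_ definition above) =====
theorem rewrite_module_order_py_spec : Claim_equal_rewrite_module_order_py := by
  intro module_order _
  unfold Spec_rewrite_module_order_py rewrite_module_order_py rewrite_module_order_py_alt
  simp only [pvFoldl1_fst, pvFoldl2_snd, pvFoldlB_snd, List.nil_append]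
  exact pvMain module_order false PySem.Set.empty (by simp [PySem.Set.empty])
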